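-- pv_equiv track=rewrite | github.com/toasa/tessoku-book | 41a.py | solve_a41
-- ===== SOURCE A (Python) =====
-- def solve_a41(S):
--     N = len(S)
--     i = 0
--     while i+2 < N:
--         if S[i] == S[i+1] == S[i+2]:
--             return "Yes"
--         elif S[i] == S[i+1]:
--             i += 2
--         else:
--             i += 1
--
--     return "No"
-- ===== SOURCE B (Python) =====
-- from itertools import groupby
--
-- def solve_a41(S):
--     return "Yes" if any(sum(1 for _ in g) >= 3 for _, g in groupby(S)) else "No"
-- ===== Notes on version B (the rewrite author's own statement) =====
-- stated objective: idiomatic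
-- what changed: Replaced the variable-step index loop with itertools.groupby: collapse S into maximal runs of equal characters and answer Yes iff some run has length >= 3.
import Mathlib
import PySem

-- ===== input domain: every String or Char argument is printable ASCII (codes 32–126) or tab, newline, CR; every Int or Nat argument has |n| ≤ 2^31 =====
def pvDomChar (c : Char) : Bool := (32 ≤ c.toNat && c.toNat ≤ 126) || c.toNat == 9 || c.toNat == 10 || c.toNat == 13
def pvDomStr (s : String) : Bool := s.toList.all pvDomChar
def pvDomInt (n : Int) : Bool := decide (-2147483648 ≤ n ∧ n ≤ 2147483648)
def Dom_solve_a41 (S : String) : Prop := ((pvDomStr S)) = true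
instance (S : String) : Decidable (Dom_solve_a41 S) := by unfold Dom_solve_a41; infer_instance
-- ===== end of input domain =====

-- B replaces A's variable-step index loop by a run-length decomposition (groupby): Yes iff some maximal run has length ≥ 3; same values, same cost.

-- ===== PORT A =====
-- A's while loop over index i; the loop guard i+2 < N guarantees all three accesses
-- are in range, so the dependent-if indexing is exact Python behaviour (no IndexError path).
def solve_a41_loop (cs : List Char) (i : Nat) : String :=
  if h : i + 2 < cs.length then
    if cs[i] = cs[i+1] ∧ cs[i+1] = cs[i+2] then "Yes"
    else if cs[i] = cs[i+1] then solve_a41_loop cs (i+2)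
    else solve_a41_loop cs (i+1)
  else "No"
termination_by cs.length - i

def solve_a41 (S : String) : String := solve_a41_loop S.toList 0

-- ===== PORT B =====
-- groupby(S): countRun consumes the current maximal run (returns its length and the rest),
-- anyRunGe3 iterates over the runs asking for one of length ≥ 3.
def countRun (c : Char) : List Char → Nat × List Char
  | [] => (1, [])
  | d :: rest => if d = c then
      let p := countRun c rest
      (p.1 + 1, p.2)
    else (1, d :: rest)

theorem countRun_snd_len (c : Char) (l : List Char) : (countRun c l).2.length ≤ l.length := by
  induction l with
  | nil => simp [countRun]
  | cons d rest ih =>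
    simp only [countRun]
    split
    · exact Nat.le_trans ih (Nat.le_succ _)
    · simp

def anyRunGe3 : List Char → Bool
  | [] => false
  | c :: rest =>
    let p := countRun c rest
    if p.1 ≥ 3 then true else anyRunGe3 p.2
termination_by l => l.length
decreasing_by
  exact Nat.lt_succ_of_le (countRun_snd_len c rest)

def solve_a41_alt (S : String) : String := if anyRunGe3 S.toList then "Yes" else "No"

-- ===== PRECONDITION & SPEC =====
def Spec_solve_a41 (S : String) (out : String) : Prop := out = solve_a41_alt S
instance (S : String) (out : String) : Decidable (Spec_solve_a41 S out) := by unfold Spec_solve_a41; infer_instance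

-- ===== CLAIM (what is proved, stated in full; the proofs are below) =====
def Claim_equal_solve_a41 : Prop := ∀ (S : String), Dom_solve_a41 S → Spec_solve_a41 S (solve_a41 S)

-- ===== LEMMAS AND PROOFS =====

/-- Reference predicate: the list contains three consecutive equal characters. -/
def hasTriple : List Char → Bool
  | a :: b :: c :: r => (a = b ∧ b = c : Bool) || hasTriple (b :: c :: r)
  | _ => false

theorem hasTriple_short (l : List Char) (h : l.length < 3) : hasTriple l = false := by
  match l with
  | [] => rfl
  | [_] => rfl
  | [_, _] => rfl
  | _ :: _ :: _ :: _ => simp at h; omega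

theorem hasTriple_cons_ne (c : Char) (r : List Char)
    (h : ∀ d, r.head? = some d → d ≠ c) : hasTriple (c :: r) = hasTriple r := by
  match r with
  | [] => rfl
  | [_] => rfl
  | d :: e :: r2 =>
    have hd : d ≠ c := h d rfl
    have hb : (c = d ∧ d = e : Bool) = false :=
      decide_eq_false (fun hh => hd hh.1.symm)
    simp only [hasTriple, hb, Bool.false_or]

theorem countRun_spec (c : Char) (l : List Char) :
    ∃ k r, countRun c l = (k + 1, r) ∧ l = List.replicate k c ++ r ∧
      (∀ d, r.head? = some d → d ≠ c) := by
  induction l with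
  | nil => exact ⟨0, [], rfl, rfl, by simp⟩
  | cons d rest ih =>
    by_cases hdc : d = c
    · obtain ⟨k, r, hc, hl, hh⟩ := ih
      refine ⟨k + 1, r, ?_, ?_, hh⟩
      · simp [countRun, hdc, hc]
      · subst hdc; rw [hl]; simp [List.replicate_succ]
    · exact ⟨0, d :: rest, by simp [countRun, hdc], by simp, by
        intro e he; simp at he; subst he; exact hdc⟩

theorem anyRunGe3_eq_hasTriple : ∀ l : List Char, anyRunGe3 l = hasTriple l
  | [] => by rw [anyRunGe3]; rfl
  | c :: rest => by
    obtain ⟨k, r, hc, hl, hh⟩ := countRun_spec c rest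
    have hlen : r.length ≤ rest.length := by rw [hl]; simp
    have ihr : anyRunGe3 r = hasTriple r := anyRunGe3_eq_hasTriple r
    rw [show anyRunGe3 (c :: rest) =
        (if (countRun c rest).1 ≥ 3 then true else anyRunGe3 (countRun c rest).2) from by
          rw [anyRunGe3], hc]
    subst hl
    match k with
    | 0 =>
      simp only [List.replicate, List.nil_append]
      rw [hasTriple_cons_ne c r hh, if_neg (by omega), ihr]
    | 1 =>
      simp only [List.replicate, List.nil_append, List.cons_append]
      have h2 : hasTriple (c :: c :: r) = hasTriple (c :: r) := by
        match r with
        | [] => rfl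
        | d :: r2 =>
          have hd : d ≠ c := hh d rfl
          simp only [hasTriple]
          simp [Ne.symm hd]
      rw [h2, hasTriple_cons_ne c r hh, if_neg (by omega), ihr]
    | (k+2) =>
      rw [if_pos (by omega)]
      simp [List.replicate_succ, hasTriple]
termination_by l => l.length
decreasing_by
  exact Nat.lt_succ_of_le hlen

theorem loop_eq_hasTriple (cs : List Char) (i : Nat) :
    solve_a41_loop cs i = if hasTriple (cs.drop i) then "Yes" else "No" := by
  rw [solve_a41_loop]
  by_cases h : i + 2 < cs.length
  · have hi : i < cs.length := by omega
    have hi1 : i + 1 < cs.length := by omega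
    have hdrop : cs.drop i = cs[i] :: cs[i+1] :: cs[i+2] :: cs.drop (i+3) := by
      rw [List.drop_eq_getElem_cons hi, List.drop_eq_getElem_cons hi1,
        List.drop_eq_getElem_cons h]
    rw [dif_pos h]
    by_cases ht : cs[i] = cs[i+1] ∧ cs[i+1] = cs[i+2]
    · rw [if_pos ht, hdrop]
      have hb : (cs[i] = cs[i+1] ∧ cs[i+1] = cs[i+2] : Bool) = true := decide_eq_true ht
      simp only [hasTriple, hb, Bool.true_or, if_pos]
    · rw [if_neg ht]
      have hb : (cs[i] = cs[i+1] ∧ cs[i+1] = cs[i+2] : Bool) = false := decide_eq_false ht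
      by_cases he : cs[i] = cs[i+1]
      · rw [if_pos he, loop_eq_hasTriple cs (i+2)]
        have hne : cs[i+1] ≠ cs[i+2] := fun hh => ht ⟨he, hh⟩
        have hdrop2 : cs.drop (i+2) = cs[i+2] :: cs.drop (i+3) := List.drop_eq_getElem_cons h
        have : hasTriple (cs.drop i) = hasTriple (cs.drop (i+2)) := by
          rw [hdrop, hdrop2]
          simp only [hasTriple, hb, Bool.false_or]
          exact hasTriple_cons_ne _ _ (by
            intro d hd
            simp only [List.head?_cons, Option.some.injEq] at hd
            subst hd; exact fun hh => hne hh.symm)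
        rw [this]
      · rw [if_neg he, loop_eq_hasTriple cs (i+1)]
        have hdrop1 : cs.drop (i+1) = cs[i+1] :: cs[i+2] :: cs.drop (i+3) := by
          rw [List.drop_eq_getElem_cons hi1, List.drop_eq_getElem_cons h]
        have : hasTriple (cs.drop i) = hasTriple (cs.drop (i+1)) := by
          rw [hdrop, hdrop1]
          exact hasTriple_cons_ne _ _ (by
            intro d hd
            simp only [List.head?_cons, Option.some.injEq] at hd
            subst hd; exact fun hh => he hh.symm)
        rw [this]
  · rw [dif_neg h]
    have hsh : hasTriple (cs.drop i) = false :=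
      hasTriple_short _ (by simp only [List.length_drop]; omega)
    rw [hsh]; rfl
termination_by cs.length - i
decreasing_by
  · omega
  · omega

-- ===== VERDICT (by name: the statement is the Claim_ definition above) =====
theorem solve_a41_spec : Claim_equal_solve_a41 := by
  intro S _
  unfold Spec_solve_a41 solve_a41 solve_a41_alt
  rw [loop_eq_hasTriple, List.drop_zero, anyRunGe3_eq_hasTriple]
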